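-- pv_equiv track=rewrite | github.com/justinbourb/myscripts | palindrome_code_challenge.py | characterCountFunc
-- ===== SOURCE A (Python) =====
-- def characterCountFunc(string):
--     '''this function accepts a string and returns the number of times each character appears
--     and their distance apart so string does not have to be queried twice'''
--     occurence_dict={}
--     for i in range(len(string)):
--         if not string[i] in occurence_dict:
--             occurence_dict[string[i]] = [1,i]
--         else:
--             occurence_dict[string[i]][0] += 1
--             occurence_dict[string[i]].append(i)
--     return occurence_dict
-- ===== SOURCE B (Python) =====
-- def characterCountFunc(string):
--     '''for each distinct character (first-appearance order), rescan the
--     string collecting its positions, then record [count] + positions'''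
--     result = {}
--     for ch in dict.fromkeys(string):
--         idx = [i for i in range(len(string)) if string[i] == ch]
--         result[ch] = [len(idx)] + idx
--     return result
-- ===== Notes on version B (the rewrite author's own statement) =====
-- stated objective: alternative
-- what changed: B replaces A's single mutating pass (one dict record updated per index) with an outer loop over the distinct characters (dict.fromkeys order) that rescans the whole string per character to collect its positions, O(n*k) nested scans instead of A's O(n) one-pass dict mutation.
import Mathlib
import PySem

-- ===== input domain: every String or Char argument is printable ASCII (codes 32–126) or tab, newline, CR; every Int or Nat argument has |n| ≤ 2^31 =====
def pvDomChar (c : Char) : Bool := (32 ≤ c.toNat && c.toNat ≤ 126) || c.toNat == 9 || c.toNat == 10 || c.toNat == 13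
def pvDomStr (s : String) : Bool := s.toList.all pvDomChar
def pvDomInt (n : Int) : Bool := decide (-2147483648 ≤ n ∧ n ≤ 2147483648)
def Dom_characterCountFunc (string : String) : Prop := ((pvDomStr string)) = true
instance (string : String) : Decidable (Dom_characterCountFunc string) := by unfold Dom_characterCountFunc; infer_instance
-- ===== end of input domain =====

-- B iterates over the distinct characters (first-appearance order, dict.fromkeys) and rescans the
-- whole string per character to collect its positions, instead of A's single mutating pass; same
-- result, alternative (nested-scan) algorithm, not claimed faster.

-- ===== PORT A =====
-- one indexed loop; the in-place list mutation ([0] += 1; append(i)) is ported as an overwrite-insert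
def characterCountFunc (string : String) : List (String × List Int) :=
  ((PySem.List.pyRange 0 (PySem.List.len string.toList) 1).foldl
    (fun (d : PySem.Dict String (List Int)) i =>
      let s : String := String.ofList [PySem.List.pyGetD string.toList i '?']
      if d.contains s = false then
        d.insert s [1, i]
      else
        d.insert s ((match d.getD s [] with
          | [] => []
          | h :: t => (h + 1) :: t) ++ [i]))
    PySem.Dict.empty).items

-- ===== PORT B =====
-- outer loop over dict.fromkeys(string) (= PySem.List.dedup); per character the comprehension
-- [i for i in range(len(string)) if string[i] == ch] is the filter over pyRange
def characterCountFunc_alt (string : String) : List (String × List Int) :=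
  ((PySem.List.dedup string.toList).foldl
    (fun (d : PySem.Dict String (List Int)) ch =>
      let idx := (PySem.List.pyRange 0 (PySem.List.len string.toList) 1).filter
        (fun i => PySem.List.pyGetD string.toList i '?' == ch)
      d.insert (String.ofList [ch]) (((idx.length : Int)) :: idx))
    PySem.Dict.empty).items

-- ===== PRECONDITION & SPEC =====
def Spec_characterCountFunc (string : String) (out : List (String × List Int)) : Prop := out = characterCountFunc_alt string
instance (string : String) (out : List (String × List Int)) : Decidable (Spec_characterCountFunc string out) := by unfold Spec_characterCountFunc; infer_instance

-- ===== CLAIM (what is proved, stated in full; the proofs are below) =====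
def Claim_equal_characterCountFunc : Prop := ∀ (string : String), Dom_characterCountFunc string → Spec_characterCountFunc string (characterCountFunc string)

-- ===== LEMMAS AND PROOFS =====

/-- the single-character key both programs use -/
def pvKey (c : Char) : String := String.ofList [c]

theorem pvKey_inj : Function.Injective pvKey := by
  intro a b h
  have := congrArg String.toList h
  simpa [pvKey] using this

/-- the ascending positions of c in s, exactly B's per-character comprehension -/
def pvPos (s : List Char) (c : Char) : List Int :=
  (PySem.List.pyRange 0 (PySem.List.len s) 1).filter
    (fun i => PySem.List.pyGetD s i '?' == c)

/-- the assembly: prepend the count to the position list -/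
def pvF (p : String × List Int) : String × List Int := (p.1, ((p.2.length : Int)) :: p.2)

theorem find?_map_pvF (l : List (String × List Int)) (k : String) :
    List.find? (fun p => p.1 == k) (l.map pvF) = (List.find? (fun p => p.1 == k) l).map pvF := by
  induction l with
  | nil => simp
  | cons p t ih =>
    by_cases h : p.1 = k
    · simp [pvF, h]
    · simp [pvF, h, ih]

theorem get?_mk_map_pvF (l : List (String × List Int)) (k : String) :
    (PySem.Dict.mk (l.map pvF)).get? k
      = ((PySem.Dict.mk l).get? k).map (fun v => ((v.length : Int)) :: v) := by
  simp only [PySem.Dict.get?, find?_map_pvF]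
  cases List.find? (fun p => p.1 == k) l with
  | none => rfl
  | some p => rfl

theorem get?_of_items_map_pvF (dA dB : PySem.Dict String (List Int))
    (h : dA.items = dB.items.map pvF) (k : String) :
    dA.get? k = (dB.get? k).map (fun v => ((v.length : Int)) :: v) := by
  have h1 : dA = PySem.Dict.mk (dB.items.map pvF) := PySem.Dict.ext h
  have h2 : dB = PySem.Dict.mk dB.items := PySem.Dict.ext rfl
  rw [h1, get?_mk_map_pvF, ← h2]

theorem contains_of_items_map_pvF (dA dB : PySem.Dict String (List Int))
    (h : dA.items = dB.items.map pvF) (k : String) :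
    dA.contains k = dB.contains k := by
  rw [PySem.Dict.contains_eq_isSome_get?, PySem.Dict.contains_eq_isSome_get?,
    get?_of_items_map_pvF dA dB h k]
  cases dB.get? k <;> rfl

theorem step_items (dA dB : PySem.Dict String (List Int))
    (h : dA.items = dB.items.map pvF) (i : Int) (s : String) :
    (if dA.contains s = false then
        dA.insert s [1, i]
      else
        dA.insert s ((match dA.getD s [] with
          | [] => []
          | h :: t => (h + 1) :: t) ++ [i])).items
      = ((dB.modify s [] (fun l => l ++ [i])).items).map pvF := by
  have hc := contains_of_items_map_pvF dA dB h s
  have hmod : dB.modify s [] (fun l => l ++ [i]) = dB.insert s (dB.getD s [] ++ [i]) := rfl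
  rw [hmod]
  by_cases hb : dB.contains s = true
  · -- existing key: overwrite in place
    have hA : dA.contains s = true := by rw [hc, hb]
    have hv : ∃ v, dB.get? s = some v := by
      rw [PySem.Dict.contains_eq_isSome_get?] at hb
      exact Option.isSome_iff_exists.mp hb
    obtain ⟨v, hv⟩ := hv
    have hAg : dA.getD s [] = ((v.length : Int)) :: v := by
      simp [PySem.Dict.getD, get?_of_items_map_pvF dA dB h s, hv]
    rw [hA, hAg]
    simp only [Bool.true_eq_false, if_false, PySem.Dict.items_insert, hA, hb,
      h, PySem.Dict.getD, hv, Option.getD_some]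
    simp only [if_true, List.map_map]
    apply List.map_congr_left
    intro p _
    by_cases hp : p.1 = s
    · simp only [Function.comp, pvF, hp, beq_self_eq_true, if_true]
      refine Prod.ext rfl ?_
      push_cast
      simp
    · simp [pvF, hp, Function.comp]
  · -- new key: append
    have hb' : dB.contains s = false := by simpa using hb
    have hA : dA.contains s = false := by rw [hc, hb']
    have hq : dB.get? s = none := by
      rw [PySem.Dict.contains_eq_isSome_get?] at hb'
      exact Option.not_isSome_iff_eq_none.mp (by simp [hb'])
    have hg : dB.getD s [] = [] := by simp [PySem.Dict.getD, hq]
    rw [hA, hg]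
    simp [PySem.Dict.items_insert, hA, hb', h, pvF]

/-- A's fold over (index, char) pairs tracks the count-free grouping fold through pvF -/
theorem fold_items (l : List (Int × Char)) :
    ∀ (dA dB : PySem.Dict String (List Int)), dA.items = dB.items.map pvF →
    (l.foldl
      (fun (d : PySem.Dict String (List Int)) p =>
        let s : String := String.ofList [p.2]
        if d.contains s = false then
          d.insert s [1, p.1]
        else
          d.insert s ((match d.getD s [] with
            | [] => []
            | h :: t => (h + 1) :: t) ++ [p.1])) dA).items
    = ((l.foldl
      (fun (d : PySem.Dict String (List Int)) p =>
        d.modify (String.ofList [p.2]) [] (fun l => l ++ [p.1])) dB).items).map pvF := by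
  induction l with
  | nil => intro dA dB h; simpa using h
  | cons p t ih =>
    intro dA dB h
    simp only [List.foldl_cons]
    exact ih _ _ (step_items dA dB h p.1 (String.ofList [p.2]))

/-- ordered dedup commutes with an injective map -/
theorem update_map_inj {α β : Type} [BEq α] [LawfulBEq α] [BEq β] [LawfulBEq β]
    (f : α → β) (hf : Function.Injective f) (l : List α) :
    ∀ (acc : List α), PySem.Set.update (acc.map f) (l.map f) = (PySem.Set.update acc l).map f := by
  induction l with
  | nil => intro acc; rfl
  | cons x t ih =>
    intro acc
    have hadd : PySem.Set.add (acc.map f) (f x) = (PySem.Set.add acc x).map f := by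
      by_cases h : x ∈ acc
      all_goals simp [PySem.Set.add, PySem.Set.contains, h, hf.eq_iff]
    simp only [List.map_cons, List.foldl_cons, PySem.Set.update] at *
    rw [hadd, ih]

theorem dedup_map_inj {α β : Type} [BEq α] [LawfulBEq α] [BEq β] [LawfulBEq β]
    (f : α → β) (hf : Function.Injective f) (l : List α) :
    PySem.List.dedup (l.map f) = (PySem.List.dedup l).map f :=
  update_map_inj f hf l []

theorem beq_pvKey (a c : Char) : (pvKey a == pvKey c) = (a == c) := by
  by_cases h : a = c
  · simp [h]
  · have hne : pvKey a ≠ pvKey c := fun hh => h (pvKey_inj hh)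
    simp [h, hne]

/-- the grouping fold's value at a key is exactly B's per-character position scan -/
theorem groupD_eq_pvPos (s : List Char) (c : Char) :
    ((PySem.List.enumerate s).foldl
      (fun (d : PySem.Dict String (List Int)) p =>
        d.modify (String.ofList [p.2]) [] (fun l => l ++ [p.1])) PySem.Dict.empty).getD (pvKey c) []
    = pvPos s c := by
  have hfold :
      (PySem.List.enumerate s).foldl
        (fun (d : PySem.Dict String (List Int)) p =>
          d.modify (String.ofList [p.2]) [] (fun l => l ++ [p.1])) PySem.Dict.empty
      = ((PySem.List.enumerate s).map (fun p : Int × Char => (pvKey p.2, p.1))).foldl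
          (fun (d : PySem.Dict String (List Int)) q =>
            d.modify q.1 [] (fun l => l ++ [q.2])) PySem.Dict.empty := by
    rw [List.foldl_map]; rfl
  rw [hfold, PySem.Dict.getD_foldl_modify_append]
  rw [PySem.List.enumerate_eq_map_pyRange s '?']
  simp only [List.filter_map, List.map_map, Function.comp_def, PySem.Dict.getD_empty,
    List.nil_append]
  have hp2 : (fun j : Int => pvKey (PySem.List.pyGetD s j '?') == pvKey c)
      = (fun j : Int => PySem.List.pyGetD s j '?' == c) :=
    funext fun j => beq_pvKey _ c
  rw [hp2]
  simp [pvPos]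

/-- items of the grouping fold: one entry per distinct character, positions in order -/
theorem group_items (s : List Char) :
    ((PySem.List.enumerate s).foldl
      (fun (d : PySem.Dict String (List Int)) p =>
        d.modify (String.ofList [p.2]) [] (fun l => l ++ [p.1])) PySem.Dict.empty).items
    = (PySem.List.dedup s).map (fun c => (pvKey c, pvPos s c)) := by
  have hk := PySem.Dict.keys_foldl_modify_key (PySem.List.enumerate s)
    (fun p : Int × Char => String.ofList [p.2]) ([] : List Int)
    (fun _ p v => v ++ [p.1]) PySem.Dict.empty
  have h1 : (PySem.List.enumerate s).map (fun p : Int × Char => String.ofList [p.2])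
      = s.map pvKey := by
    have := List.map_map (g := pvKey) (f := fun p : Int × Char => p.2)
      (l := PySem.List.enumerate s)
    rw [show ((PySem.List.enumerate s).map (fun p : Int × Char => String.ofList [p.2]))
        = (((PySem.List.enumerate s).map (fun p : Int × Char => p.2)).map pvKey) from this.symm,
      PySem.List.map_snd_enumerate]
  have hkeys :
      ((PySem.List.enumerate s).foldl
        (fun (d : PySem.Dict String (List Int)) p =>
          d.modify (String.ofList [p.2]) [] (fun l => l ++ [p.1])) PySem.Dict.empty).keys
      = (PySem.List.dedup s).map pvKey := by
    refine hk.trans ?_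
    rw [show PySem.Set.update (PySem.Dict.empty : PySem.Dict String (List Int)).keys
          ((PySem.List.enumerate s).map (fun p : Int × Char => String.ofList [p.2]))
        = PySem.List.dedup ((PySem.List.enumerate s).map
            (fun p : Int × Char => String.ofList [p.2])) from rfl, h1]
    exact dedup_map_inj pvKey pvKey_inj s
  have hnd :
      ((PySem.List.enumerate s).foldl
        (fun (d : PySem.Dict String (List Int)) p =>
          d.modify (String.ofList [p.2]) [] (fun l => l ++ [p.1])) PySem.Dict.empty).keys.Nodup :=
    PySem.Dict.nodup_keys_foldl_modify_key (PySem.List.enumerate s)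
      (fun p : Int × Char => String.ofList [p.2]) ([] : List Int)
      (fun _ p v => v ++ [p.1]) PySem.Dict.empty PySem.Dict.nodup_keys_empty
  rw [PySem.Dict.items_eq_map_keys _ hnd ([] : List Int), hkeys, List.map_map]
  apply List.map_congr_left
  intro c _
  simp only [Function.comp_def]
  rw [groupD_eq_pvPos s c]

/-- B's loop inserts one fresh key per distinct character -/
theorem alt_items (string : String) :
    characterCountFunc_alt string
    = (PySem.List.dedup string.toList).map
        (fun c => (pvKey c, ((pvPos string.toList c).length : Int) :: pvPos string.toList c)) := by
  have h := PySem.Dict.items_foldl_insert_fresh (PySem.List.dedup string.toList)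
    (fun c => pvKey c)
    (fun c => (((pvPos string.toList c).length : Int)) :: pvPos string.toList c)
    PySem.Dict.empty
    (fun a _ => PySem.Dict.contains_empty _)
    ((PySem.List.nodup_dedup string.toList).map pvKey_inj)
  have h2 : (PySem.Dict.empty : PySem.Dict String (List Int)).items
        ++ (PySem.List.dedup string.toList).map
            (fun c => (pvKey c, ((pvPos string.toList c).length : Int) :: pvPos string.toList c))
      = (PySem.List.dedup string.toList).map
          (fun c => (pvKey c, ((pvPos string.toList c).length : Int) :: pvPos string.toList c)) := by
    rw [show (PySem.Dict.empty : PySem.Dict String (List Int)).items = [] from rfl,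
      List.nil_append]
  exact h.trans h2

theorem characterCountFunc_items (string : String) :
    characterCountFunc string
    = (PySem.List.dedup string.toList).map
        (fun c => (pvKey c, ((pvPos string.toList c).length : Int) :: pvPos string.toList c)) := by
  have main := fold_items ((PySem.List.pyRange 0 (PySem.List.len string.toList) 1).map
      (fun j => (j, PySem.List.pyGetD string.toList j '?')))
      PySem.Dict.empty PySem.Dict.empty rfl
  have hg := group_items string.toList
  rw [PySem.List.enumerate_eq_map_pyRange string.toList '?'] at hg
  rw [hg] at main
  rw [List.foldl_map] at main
  have h3 : ((PySem.List.dedup string.toList).map (fun c => (pvKey c, pvPos string.toList c))).map pvF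
      = (PySem.List.dedup string.toList).map
          (fun c => (pvKey c, ((pvPos string.toList c).length : Int) :: pvPos string.toList c)) := by
    rw [List.map_map]
    apply List.map_congr_left
    intro c _
    rfl
  exact main.trans h3

-- ===== VERDICT (by name: the statement is the Claim_ definition above) =====
theorem characterCountFunc_spec : Claim_equal_characterCountFunc := by
  unfold Claim_equal_characterCountFunc Spec_characterCountFunc
  intro string _
  rw [characterCountFunc_items, alt_items]
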